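-- pv_equiv track=rewrite | github.com/Deependrashukla/MyWorks | previous year/2ndYear/sem4/adsa/find_maximal.py | maximal_left_right
-- ===== SOURCE A (Python) =====
-- def maximal_left_right(points_list):
--     """
--     Returns the list of maximal points in an array and the comparisons taking place.
--
--     It uses the left-to-right sweeping algorithm and requires a candidate list in addition.
--
--     Parameter_points: List of all the points to be processed
--     Precondition: Type of point should be a list containing the tuple.
--     """
--     maximal_points = []
--     comparisons = 0
--
--     for point in points_list:
--         comparisons += 1
--         while maximal_points and maximal_points[-1][1] <= point[1]:
--             comparisons += 1
--             maximal_points.pop()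
--         maximal_points.append(point)
--
--     return maximal_points, comparisons
-- ===== SOURCE B (Python) =====
-- def maximal_left_right(points_list):
--     """Maximal points via a single right-to-left scan with a running maximum;
--     the comparison count is computed in closed form as 2*n - len(result)."""
--     result = []
--     running_max = None
--     for point in reversed(points_list):
--         if running_max is None or point[1] > running_max:
--             result.append(point)
--             running_max = point[1]
--     result.reverse()
--     return result, 2 * len(points_list) - len(result)
-- ===== Notes on version B (the rewrite author's own statement) =====
-- stated objective: simpler
-- what changed: Replaces the stack with pops (nested while loop) by a single right-to-left scan keeping a scalar running maximum, and computes the comparison count in closed form as 2*n - len(result).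
import Mathlib
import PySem

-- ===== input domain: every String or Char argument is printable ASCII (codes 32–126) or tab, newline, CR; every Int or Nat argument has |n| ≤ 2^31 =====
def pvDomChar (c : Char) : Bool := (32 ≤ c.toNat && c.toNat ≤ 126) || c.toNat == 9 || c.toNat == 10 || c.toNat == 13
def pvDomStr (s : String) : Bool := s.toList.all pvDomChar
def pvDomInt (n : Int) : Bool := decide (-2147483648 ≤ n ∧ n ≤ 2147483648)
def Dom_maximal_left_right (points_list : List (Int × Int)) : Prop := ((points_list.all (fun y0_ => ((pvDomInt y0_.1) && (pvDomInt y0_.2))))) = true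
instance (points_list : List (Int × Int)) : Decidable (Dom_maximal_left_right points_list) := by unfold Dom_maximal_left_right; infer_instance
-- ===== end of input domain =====

-- B replaces A's stack-with-pops (nested while loop) by a single right-to-left scan with a
-- running maximum and a closed-form comparison count (objective: simpler).


-- ===== PORT A =====
-- A's inner loop `while maximal_points and maximal_points[-1][1] <= point[1]: comparisons += 1; pop()`
-- (mp.getLast = maximal_points[-1], mp.dropLast = effect of .pop())
def mlrPop (py : Int) (mp : List (Int × Int)) (c : Int) : (List (Int × Int)) × Int :=
  if h : mp ≠ [] then
    if (mp.getLast h).2 ≤ py then mlrPop py mp.dropLast (c + 1) else (mp, c)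
  else (mp, c)
  termination_by mp.length
  decreasing_by
    have : 0 < mp.length := List.length_pos_iff.mpr h
    simp [List.length_dropLast]; omega

-- A's loop body: comparisons += 1, run the pop loop, append point
def stepA (st : (List (Int × Int)) × Int) (point : Int × Int) : (List (Int × Int)) × Int :=
  let r := mlrPop point.2 st.1 (st.2 + 1)
  (r.1 ++ [point], r.2)

def maximal_left_right (points_list : List (Int × Int)) : (List (Int × Int)) × Int :=
  points_list.foldl stepA ([], 0)

-- ===== PORT B =====
-- B's loop body: if running_max is None or point[1] > running_max: result.append(point); update
def stepB (st : (List (Int × Int)) × Option Int) (point : Int × Int) : (List (Int × Int)) × Option Int :=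
  match st.2 with
  | none => (st.1 ++ [point], some point.2)
  | some m => if m < point.2 then (st.1 ++ [point], some point.2) else st

-- loop over reversed(points_list), then result.reverse(); comparisons = 2*n - len(result)
def maximal_left_right_alt (points_list : List (Int × Int)) : (List (Int × Int)) × Int :=
  let st := points_list.reverse.foldl stepB ([], none)
  (st.1.reverse, 2 * (points_list.length : Int) - (st.1.length : Int))

-- ===== PRECONDITION & SPEC =====
def Spec_maximal_left_right (points_list : List (Int × Int)) (out : (List (Int × Int)) × Int) : Prop := out = maximal_left_right_alt points_list
instance (points_list : List (Int × Int)) (out : (List (Int × Int)) × Int) : Decidable (Spec_maximal_left_right points_list out) := by unfold Spec_maximal_left_right; infer_instance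

-- ===== CLAIM (what is proved, stated in full; the proofs are below) =====
def Claim_equal_maximal_left_right : Prop := ∀ (points_list : List (Int × Int)), Dom_maximal_left_right points_list → Spec_maximal_left_right points_list (maximal_left_right points_list)

-- ===== LEMMAS AND PROOFS =====

-- running maximum of the y-coordinates, computed the way B's fold updates it
def maxY? : List (Int × Int) → Option Int
  | [] => none
  | p :: rest =>
      match maxY? rest with
      | none => some p.2
      | some m => some (if m < p.2 then p.2 else m)

-- the kept (maximal) points, in left-to-right order
def specL : List (Int × Int) → List (Int × Int)
  | [] => []
  | p :: rest =>
      match maxY? rest with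
      | none => p :: specL rest
      | some m => if m < p.2 then p :: specL rest else specL rest

-- B characterisation ------------------------------------------------------

theorem foldrB_char (l : List (Int × Int)) :
    l.foldr (fun p st => stepB st p) ([], none) = ((specL l).reverse, maxY? l) := by
  induction l with
  | nil => simp [specL, maxY?]
  | cons p t ih =>
      rw [List.foldr_cons, ih]
      cases hm : maxY? t with
      | none => simp [stepB, specL, maxY?, hm]
      | some m => by_cases h : m < p.2 <;> simp [stepB, specL, maxY?, hm, h]

theorem alt_char (l : List (Int × Int)) :
    maximal_left_right_alt l = (specL l, 2 * (l.length : Int) - ((specL l).length : Int)) := by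
  unfold maximal_left_right_alt
  rw [List.foldl_reverse, foldrB_char]
  simp

-- A characterisation ------------------------------------------------------

-- reversed-stack model of the inner while loop (head = top of Python's stack)
def popR (py : Int) : List (Int × Int) → Int → (List (Int × Int)) × Int
  | [], c => ([], c)
  | q :: t, c => if q.2 ≤ py then popR py t (c + 1) else (q :: t, c)

theorem mlrPop_rev (py : Int) (mp : List (Int × Int)) (c : Int) :
    mlrPop py mp c = ((popR py mp.reverse c).1.reverse, (popR py mp.reverse c).2) := by
  induction mp using List.reverseRecOn generalizing c with
  | nil => simp [mlrPop, popR]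
  | append_singleton l a ih =>
      rw [mlrPop, dif_pos (by simp : l ++ [a] ≠ [])]
      rw [List.getLast_concat, List.dropLast_concat, List.reverse_append]
      simp only [List.reverse_cons, List.reverse_nil, List.nil_append, List.singleton_append]
      by_cases h : a.2 ≤ py
      · rw [if_pos h, ih, popR, if_pos h]
      · rw [if_neg h, popR, if_neg h]
        simp

theorem popR_char (py : Int) (s : List (Int × Int)) (c : Int) :
    popR py s c = (s.dropWhile (fun q => decide (q.2 ≤ py)),
      c + ((s.length : Int) - ((s.dropWhile (fun q => decide (q.2 ≤ py))).length : Int))) := by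
  induction s generalizing c with
  | nil => simp [popR]
  | cons q t ih =>
      by_cases h : q.2 ≤ py
      · have hd : (q :: t).dropWhile (fun q => decide (q.2 ≤ py))
            = t.dropWhile (fun q => decide (q.2 ≤ py)) := by
          simp [h]
        simp only [popR, if_pos h, ih, hd, Prod.mk.injEq]
        refine ⟨trivial, ?_⟩
        simp only [List.length_cons]
        push_cast
        omega
      · simp [popR, h]

-- reversed-stack model of A's loop body
def stepA' (st : (List (Int × Int)) × Int) (point : Int × Int) : (List (Int × Int)) × Int :=
  let r := popR point.2 st.1 (st.2 + 1)
  (point :: r.1, r.2)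

theorem foldA_rev (l : List (Int × Int)) (s : List (Int × Int)) (c : Int) :
    l.foldl stepA (s.reverse, c) =
      ((l.foldl stepA' (s, c)).1.reverse, (l.foldl stepA' (s, c)).2) := by
  induction l generalizing s c with
  | nil => simp
  | cons p t ih =>
      have hstep : stepA (s.reverse, c) p =
          ((stepA' (s, c) p).1.reverse, (stepA' (s, c) p).2) := by
        simp only [stepA, stepA', mlrPop_rev, List.reverse_reverse]
        simp
      simp only [List.foldl_cons, hstep]
      exact ih (stepA' (s, c) p).1 (stepA' (s, c) p).2

theorem dropWhile_false (s : List (Int × Int)) :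
    s.dropWhile (fun _ => false) = s := by
  cases s <;> simp [List.dropWhile]

theorem dropWhile_dropWhile_of_imp (p q : (Int × Int) → Bool)
    (h : ∀ x, p x = true → q x = true) (s : List (Int × Int)) :
    (s.dropWhile p).dropWhile q = s.dropWhile q := by
  induction s with
  | nil => simp
  | cons a t ih =>
      by_cases hp : p a = true
      · rw [List.dropWhile_cons_of_pos hp, ih, List.dropWhile_cons_of_pos (h a hp)]
      · rw [List.dropWhile_cons_of_neg (by simp [hp])]

-- predicate "y ≤ running maximum of l" (false when l is empty)
def belowMax (l : List (Int × Int)) (q : Int × Int) : Bool :=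
  match maxY? l with
  | none => false
  | some m => decide (q.2 ≤ m)

theorem head_dropWhile_false {p : (Int × Int) → Bool} {s : List (Int × Int)}
    {q : Int × Int} {t : List (Int × Int)} (h : s.dropWhile p = q :: t) :
    p q = false := by
  induction s with
  | nil => simp at h
  | cons a s ih =>
      by_cases hp : p a = true
      · rw [List.dropWhile_cons_of_pos hp] at h; exact ih h
      · rw [List.dropWhile_cons_of_neg (by simp [hp])] at h
        cases h; simpa using hp

-- the core invariant of A's (reversed-stack) loop
theorem foldA'_inv (l : List (Int × Int)) :
    ∀ (s : List (Int × Int)) (c : Int),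
      s.Pairwise (fun a b => a.2 < b.2) →
      l.foldl stepA' (s, c) =
        ((specL l).reverse ++ s.dropWhile (belowMax l),
          c + 2 * (l.length : Int) - ((specL l).length : Int)
            + ((s.length : Int) - ((s.dropWhile (belowMax l)).length : Int))) := by
  induction l with
  | nil =>
      intro s c _
      have hb : belowMax [] = fun (_ : Int × Int) => false := by
        funext q; simp [belowMax, maxY?]
      simp [specL, hb, dropWhile_false]
  | cons p t ih =>
      intro s c hs
      have hstep : stepA' (s, c) p =
          (p :: s.dropWhile (fun q => decide (q.2 ≤ p.2)),
           c + 1 + ((s.length : Int) - ((s.dropWhile (fun q => decide (q.2 ≤ p.2))).length : Int))) := by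
        simp only [stepA', popR_char]
      have hdsub : (s.dropWhile (fun q => decide (q.2 ≤ p.2))).Sublist s :=
        List.dropWhile_sublist _
      have hdpw : (s.dropWhile (fun q => decide (q.2 ≤ p.2))).Pairwise (fun a b => a.2 < b.2) :=
        hs.sublist hdsub
      have hall : ∀ x ∈ s.dropWhile (fun q => decide (q.2 ≤ p.2)), p.2 < x.2 := by
        cases hd : s.dropWhile (fun q => decide (q.2 ≤ p.2)) with
        | nil => simp
        | cons q d' =>
            have hq : (fun q : Int × Int => decide (q.2 ≤ p.2)) q = false :=
              head_dropWhile_false hd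
            have hq' : p.2 < q.2 := by simp at hq; omega
            have hpw' : (q :: d').Pairwise (fun a b => a.2 < b.2) := hd ▸ hdpw
            intro x hx
            rcases List.mem_cons.mp hx with rfl | hx'
            · exact hq'
            · exact lt_trans hq' ((List.pairwise_cons.mp hpw').1 x hx')
      have hpw : (p :: s.dropWhile (fun q => decide (q.2 ≤ p.2))).Pairwise (fun a b => a.2 < b.2) :=
        List.pairwise_cons.mpr ⟨hall, hdpw⟩
      rw [List.foldl_cons, hstep, ih _ _ hpw]
      cases hm : maxY? t with
      | none =>
          have hbt : belowMax t = fun (_ : Int × Int) => false := by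
            funext q; simp [belowMax, hm]
          have hbpt : belowMax (p :: t) = fun q : Int × Int => decide (q.2 ≤ p.2) := by
            funext q; simp [belowMax, maxY?, hm]
          have hspec : specL (p :: t) = p :: specL t := by simp [specL, hm]
          rw [hbt, hbpt, hspec, dropWhile_false]
          simp only [List.reverse_cons, List.length_cons, List.append_assoc,
            List.singleton_append, Prod.mk.injEq]
          refine ⟨trivial, ?_⟩
          push_cast
          omega
      | some m =>
          have hbt : belowMax t = fun q : Int × Int => decide (q.2 ≤ m) := by
            funext q; simp [belowMax, hm]
          by_cases hlt : m < p.2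
          · have hbpt : belowMax (p :: t) = fun q : Int × Int => decide (q.2 ≤ p.2) := by
              funext q; simp [belowMax, maxY?, hm, hlt]
            have hspec : specL (p :: t) = p :: specL t := by simp [specL, hm, hlt]
            have hstop : (p :: s.dropWhile (fun q => decide (q.2 ≤ p.2))).dropWhile (belowMax t)
                = p :: s.dropWhile (fun q => decide (q.2 ≤ p.2)) := by
              rw [hbt, List.dropWhile_cons_of_neg (by simp; omega)]
            rw [hstop, hbpt, hspec]
            simp only [List.reverse_cons, List.length_cons, List.append_assoc,
              List.singleton_append, Prod.mk.injEq]
            refine ⟨trivial, ?_⟩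
            push_cast
            omega
          · have hbpt : belowMax (p :: t) = fun q : Int × Int => decide (q.2 ≤ m) := by
              funext q; simp [belowMax, maxY?, hm, hlt]
            have hspec : specL (p :: t) = specL t := by simp [specL, hm, hlt]
            have hple : p.2 ≤ m := by omega
            have hstop : (p :: s.dropWhile (fun q => decide (q.2 ≤ p.2))).dropWhile (belowMax t)
                = s.dropWhile (fun q => decide (q.2 ≤ m)) := by
              rw [hbt, List.dropWhile_cons_of_pos (by simp; omega)]
              exact dropWhile_dropWhile_of_imp _ _ (by intro x hx; simp at hx ⊢; omega) s
            rw [hstop, hbpt, hspec]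
            simp only [List.length_cons, Prod.mk.injEq]
            refine ⟨trivial, ?_⟩
            have hlen1 : ((s.dropWhile (fun q => decide (q.2 ≤ p.2))).length : Int) ≤ (s.length : Int) := by
              exact_mod_cast hdsub.length_le
            push_cast
            omega

-- ===== VERDICT (by name: the statement is the Claim_ definition above) =====
theorem maximal_left_right_spec : Claim_equal_maximal_left_right := by
  intro l _
  unfold Spec_maximal_left_right
  have h0 : ([] : List (Int × Int)) = ([] : List (Int × Int)).reverse := rfl
  unfold maximal_left_right
  rw [h0, foldA_rev, foldA'_inv l [] 0 (by simp), alt_char]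
  simp
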